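-- pv_equiv track=rewrite | github.com/brenovsky/UFF | Lista P1/3-laços aninhados/ex3.py | intocavel
-- ===== SOURCE A (Python) =====
-- def intocavel(x):
--     for i in range(2, x ** 2):
--         j = 1
--         divisores = []
--         while j <= i // 2:
--             if i % j == 0:
--                 divisores.append(j)
--             j += 1
--         if sum(divisores) == x:
--             return False
--     return True
-- ===== SOURCE B (Python) =====
-- def intocavel(x):
--     # segmented divisor-sum sieve: proper-divisor sums for one block of candidates at a
--     # time (each divisor d added to its multiples in the block), then a membership test
--     # per block, so the scan stops at the first block containing a hit; block size
--     # starts small and doubles up to a cap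
--     n = x * x
--     lo = 2
--     seg = 64
--     while lo < n:
--         hi = min(lo + seg, n)
--         sums = [0] * (hi - lo)
--         d = 1
--         while 2 * d < hi:
--             m = max(2 * d, -(-lo // d) * d)  # first multiple of d that is >= lo and >= 2*d
--             while m < hi:
--                 sums[m - lo] += d
--                 m += d
--             d += 1
--         if x in sums:
--             return False
--         lo = hi
--         seg = min(2 * seg, 4096)
--     return True
-- ===== Notes on version B (the rewrite author's own statement) =====
-- stated objective: faster
-- what changed: B replaces A's per-candidate trial-division scan (every j up to i//2 for each candidate i) by a segmented divisor sieve: proper-divisor sums for a whole block of candidates at a time, each divisor added to its multiples in the block, with a membership test per block.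
import Mathlib
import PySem

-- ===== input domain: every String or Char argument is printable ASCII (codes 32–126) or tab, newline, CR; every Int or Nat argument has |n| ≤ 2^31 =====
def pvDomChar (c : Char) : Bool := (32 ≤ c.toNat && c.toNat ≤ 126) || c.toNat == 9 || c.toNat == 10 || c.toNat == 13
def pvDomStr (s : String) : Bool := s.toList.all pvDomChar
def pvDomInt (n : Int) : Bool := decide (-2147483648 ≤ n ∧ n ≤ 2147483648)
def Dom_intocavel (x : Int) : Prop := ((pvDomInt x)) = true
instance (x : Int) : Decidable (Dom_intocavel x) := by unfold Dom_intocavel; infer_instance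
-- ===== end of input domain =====

-- B replaces A's per-candidate trial-division loops by a segmented divisor sieve (proper-divisor
-- sums for one block of candidates at a time, each divisor added to its multiples in the block)
-- with a membership test per block; faster.

-- ===== PORT A =====
-- the inner 'while j <= i // 2' loop of A, collecting divisors into a list
def divsA (i : Int) (j : Int) (acc : List Int) : List Int :=
  if _h : j ≤ PySem.Int.floordiv i 2 then
    divsA i (j + 1) (if PySem.Int.mod i j == 0 then acc ++ [j] else acc)
  else acc
termination_by (PySem.Int.floordiv i 2 + 1 - j).toNat
decreasing_by omega

-- the outer 'for i in range(2, x ** 2)' loop with early return False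
def loopA (x : Int) : List Int → Bool
  | [] => true
  | i :: rest => if (divsA i 1 []).sum == x then false else loopA x rest

def intocavel (x : Int) : Bool := loopA x (PySem.List.pyRange 2 (x ^ 2) 1)

-- ===== PORT B =====
-- B's innermost 'while m < hi: sums[m - lo] += d; m += d' — the '0 < d' conjunct in the guard is a
-- totality guard only (every call site passes d ≥ 1, where it is vacuous); the Python list is an Array
def addMult (hi lo d m : Int) (sums : Array Int) : Array Int :=
  if _h : m < hi ∧ 0 < d then
    addMult hi lo d (m + d) (sums.modify (m - lo).toNat (· + d))
  else sums
termination_by (hi - m).toNat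
decreasing_by omega

-- B's 'while 2 * d < hi' loop over divisors d; m starts at max(2*d, -(-lo//d)*d)
def divLoop (hi lo d : Int) (sums : Array Int) : Array Int :=
  if _h : 2 * d < hi then
    divLoop hi lo (d + 1)
      (addMult hi lo d (max (2 * d) (-(PySem.Int.floordiv (-lo) d) * d)) sums)
  else sums
termination_by (hi - 2 * d).toNat
decreasing_by omega

-- B's 'while lo < n' loop over blocks, with early return False — the '0 < seg' conjunct in the
-- guard is a totality guard only (every call site passes seg ≥ 64, where it is vacuous)
def segLoop (x n lo seg : Int) : Bool :=
  if _h : lo < n ∧ 0 < seg then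
    let hi := min (lo + seg) n
    -- sums = [0] * (hi - lo)  (lo < hi, so .toNat is exact)
    let sums := divLoop hi lo 1 (Array.replicate (hi - lo).toNat 0)
    -- if x in sums: return False
    if sums.toList.contains x then false else segLoop x n hi (min (2 * seg) 4096)
  else true
termination_by (n - lo).toNat
decreasing_by omega

def intocavel_alt (x : Int) : Bool := segLoop x (x * x) 2 64

-- ===== PRECONDITION & SPEC =====
def Spec_intocavel (x : Int) (out : Bool) : Prop := out = intocavel_alt x
instance (x : Int) (out : Bool) : Decidable (Spec_intocavel x out) := by unfold Spec_intocavel; infer_instance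

-- ===== CLAIM (what is proved, stated in full; the proofs are below) =====
def Claim_equal_intocavel : Prop := ∀ (x : Int), Dom_intocavel x → Spec_intocavel x (intocavel x)

-- ===== LEMMAS AND PROOFS =====

-- the sum of the proper divisors of m (divisors ≤ m/2), the reference value both ports compute
def propSum (m : ℕ) : ℕ := ∑ k ∈ Finset.Ico 1 (m / 2 + 1), if k ∣ m then k else 0

-- ---- A side ----
theorem divsA_sum (n j : ℕ) (hj : 1 ≤ j) (acc : List Int) :
    (divsA (n : Int) (j : Int) acc).sum
      = acc.sum + ((∑ k ∈ Finset.Ico j (n / 2 + 1), if k ∣ n then k else 0 : ℕ) : Int) := by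
  have hfd : PySem.Int.floordiv (n:Int) 2 = ((n / 2 : ℕ) : Int) := by
    rw [PySem.Int.floordiv_eq_ediv_of_pos (by norm_num)]
    exact (Int.natCast_div n 2)
  have hmod : PySem.Int.mod (n:Int) (j:Int) = ((n % j : ℕ) : Int) := PySem.Int.mod_natCast n j
  by_cases h : j ≤ n / 2
  · rw [divsA, dif_pos (by rw [hfd]; exact_mod_cast h)]
    have hrec := divsA_sum n (j+1) (by omega) (if PySem.Int.mod (n:Int) (j:Int) == 0 then acc ++ [(j:Int)] else acc)
    push_cast at hrec
    rw [hrec]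
    rw [Finset.sum_eq_sum_Ico_succ_bot (a := j) (b := n / 2 + 1) (by omega)]
    by_cases hd : j ∣ n
    · have h0 : n % j = 0 := Nat.dvd_iff_mod_eq_zero.mp hd
      rw [hmod, h0]
      simp only [Nat.cast_zero, beq_self_eq_true, if_true, if_pos hd, List.sum_append,
        List.sum_cons, List.sum_nil]
      push_cast
      ring
    · have h0 : n % j ≠ 0 := fun h0 => hd (Nat.dvd_iff_mod_eq_zero.mpr h0)
      rw [hmod]
      have hb : (((n % j : ℕ) : Int) == 0) = false := by
        simp
        exact_mod_cast hd
      rw [hb]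
      simp only [if_neg hd]
      push_cast
      ring
  · rw [divsA, dif_neg (by rw [hfd]; exact_mod_cast h)]
    rw [Finset.Ico_eq_empty (by omega)]
    simp
termination_by n / 2 + 1 - j
decreasing_by omega

theorem divsA_eq_propSum (m : ℕ) : (divsA (m : Int) 1 []).sum = (propSum m : Int) := by
  have h := divsA_sum m 1 (le_refl 1) []
  rw [Nat.cast_one] at h
  simpa [propSum] using h

theorem loopA_true_iff (x : Int) (l : List Int) :
    loopA x l = true ↔ ∀ i ∈ l, (divsA i 1 []).sum ≠ x := by
  induction l with
  | nil => simp [loopA]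
  | cons i rest ih =>
    by_cases h : (divsA i 1 []).sum = x
    · simp [loopA, h]
    · simp [loopA, h, ih]

-- ---- B side ----
-- proof-side mirrors of the sieve loops over the array's underlying list
def addMultL (hi lo d m : Int) (sums : List Int) : List Int :=
  if _h : m < hi ∧ 0 < d then
    addMultL hi lo d (m + d) (sums.modify (m - lo).toNat (· + d))
  else sums
termination_by (hi - m).toNat
decreasing_by omega

def divLoopL (hi lo d : Int) (sums : List Int) : List Int :=
  if _h : 2 * d < hi then
    divLoopL hi lo (d + 1)
      (addMultL hi lo d (max (2 * d) (-(PySem.Int.floordiv (-lo) d) * d)) sums)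
  else sums
termination_by (hi - 2 * d).toNat
decreasing_by omega

theorem addMult_toList (hi lo d m : Int) (sums : Array Int) :
    (addMult hi lo d m sums).toList = addMultL hi lo d m sums.toList := by
  rw [addMult, addMultL]
  split
  · rw [addMult_toList, Array.toList_modify]
  · rfl
termination_by (hi - m).toNat
decreasing_by omega

theorem divLoop_toList (hi lo d : Int) (sums : Array Int) :
    (divLoop hi lo d sums).toList = divLoopL hi lo d sums.toList := by
  rw [divLoop, divLoopL]
  split
  · rw [divLoop_toList, addMult_toList]
  · rfl
termination_by (hi - 2 * d).toNat
decreasing_by omega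

theorem addMultL_length (hi lo d m : Int) (sums : List Int) :
    (addMultL hi lo d m sums).length = sums.length := by
  rw [addMultL]
  split
  · rw [addMultL_length]
    exact List.length_modify _ _ _
  · rfl
termination_by (hi - m).toNat
decreasing_by omega

theorem divLoopL_length (hi lo d : Int) (sums : List Int) :
    (divLoopL hi lo d sums).length = sums.length := by
  rw [divLoopL]
  split
  · rw [divLoopL_length, addMultL_length]
  · rfl
termination_by (hi - 2 * d).toNat
decreasing_by omega

theorem addMultL_getD (hi lo d m : Int) (sums : List Int) (hd : 0 < d) (hm : lo ≤ m)
    (hhi : hi ≤ lo + (sums.length : Int)) (k : ℕ) :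
    (addMultL hi lo d m sums).getD k 0
      = sums.getD k 0
        + (if m ≤ lo + (k:Int) ∧ lo + (k:Int) < hi ∧ d ∣ (lo + (k:Int) - m) then d else 0) := by
  by_cases h : m < hi
  · rw [addMultL, dif_pos ⟨h, hd⟩]
    rw [addMultL_getD hi lo d (m + d) (sums.modify (m - lo).toNat (· + d)) hd (by omega)
      (by rw [List.length_modify]; exact hhi) k]
    have hmem : (sums.modify (m - lo).toNat (· + d)).getD k 0
        = sums.getD k 0 + (if (m - lo).toNat = k then d else 0) := by
      rw [List.getD_eq_getElem?_getD, List.getElem?_modify, List.getD_eq_getElem?_getD]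
      by_cases he : (m - lo).toNat = k
      · have hlt : k < sums.length := by omega
        rw [List.getElem?_eq_getElem hlt]
        simp [he]
      · simp [he]
    rw [hmem]
    by_cases he : lo + (k:Int) = m
    · have h1 : (m - lo).toNat = k := by omega
      have h2 : ¬ (m + d ≤ lo + (k:Int) ∧ lo + (k:Int) < hi ∧ d ∣ (lo + (k:Int) - (m + d))) := by
        intro hc; omega
      have h3 : m ≤ lo + (k:Int) ∧ lo + (k:Int) < hi ∧ d ∣ (lo + (k:Int) - m) := by
        refine ⟨by omega, by omega, ?_⟩
        rw [he, sub_self]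
        exact dvd_zero d
      rw [if_pos h1, if_neg h2, if_pos h3]
      ring
    · have hne : (m - lo).toNat ≠ k := by omega
      rw [if_neg hne, add_zero]
      have hiff : (m + d ≤ lo + (k:Int) ∧ lo + (k:Int) < hi ∧ d ∣ (lo + (k:Int) - (m + d)))
          ↔ (m ≤ lo + (k:Int) ∧ lo + (k:Int) < hi ∧ d ∣ (lo + (k:Int) - m)) := by
        constructor
        · intro ⟨h1, h2, h3⟩
          refine ⟨by omega, h2, ?_⟩
          have he2 : lo + (k:Int) - m = (lo + (k:Int) - (m + d)) + d := by ring
          rw [he2]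
          exact dvd_add h3 (dvd_refl d)
        · intro ⟨h1, h2, h3⟩
          have h0 : 0 < lo + (k:Int) - m := by omega
          have hled := Int.le_of_dvd h0 h3
          refine ⟨by omega, h2, ?_⟩
          have he2 : lo + (k:Int) - (m + d) = (lo + (k:Int) - m) - d := by ring
          rw [he2]
          exact dvd_sub h3 (dvd_refl d)
      rw [if_congr hiff rfl rfl]
  · rw [addMultL, dif_neg (fun hc => h hc.1)]
    rw [if_neg (by intro ⟨h1, h2, _⟩; omega)]
    ring
termination_by (hi - m).toNat
decreasing_by omega

theorem divLoopL_getD (hi lo : ℕ) (d : Int) (sums : List Int) (hd : 0 < d) (hlo : 0 < lo)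
    (k : ℕ) (hk : lo + k < hi) (hlen : hi ≤ lo + sums.length) :
    (divLoopL (hi:Int) (lo:Int) d sums).getD k 0
      = sums.getD k 0
        + ((∑ e ∈ Finset.Ico d.toNat hi,
            if e ∣ (lo + k) ∧ 2 * e ≤ lo + k then e else 0 : ℕ) : Int) := by
  by_cases h : 2 * d < (hi:Int)
  · rw [divLoopL, dif_pos h]
    rw [divLoopL_getD hi lo (d + 1) _ (by omega) hlo k hk
      (by rw [addMultL_length]; exact hlen)]
    have hfd : PySem.Int.floordiv (-(lo:Int)) d = (-(lo:Int)) / d :=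
      PySem.Int.floordiv_eq_ediv_of_pos hd
    rw [hfd]
    set m0 : Int := max (2 * d) (-(-(lo:Int) / d) * d) with hm0
    have hceil : (lo:Int) ≤ -(-(lo:Int) / d) * d := by
      have h1 := Int.ediv_mul_le (-(lo:Int)) (by omega : d ≠ 0)
      have h2 : -(-(lo:Int) / d) * d = -(-(lo:Int) / d * d) := by ring
      rw [h2]
      linarith
    have hdm0 : d ∣ m0 := by
      rcases max_choice (2 * d) (-(-(lo:Int) / d) * d) with hc | hc <;> rw [hm0, hc]
      · exact ⟨2, by ring⟩
      · exact ⟨-(-(lo:Int) / d), by ring⟩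
    rw [addMultL_getD ((hi:ℕ):Int) ((lo:ℕ):Int) d m0 sums hd (le_trans hceil (le_max_right _ _))
      (by exact_mod_cast hlen) k]
    have hd1 : (d + 1).toNat = d.toNat + 1 := by omega
    rw [hd1]
    rw [Finset.sum_eq_sum_Ico_succ_bot (a := d.toNat) (b := hi) (by omega)]
    have hdc : ((d.toNat : ℕ) : Int) = d := by omega
    have hiff : (m0 ≤ (lo:Int) + (k:Int) ∧ (lo:Int) + (k:Int) < (hi:Int) ∧ d ∣ ((lo:Int) + (k:Int) - m0))
        ↔ (d.toNat ∣ (lo + k) ∧ 2 * d.toNat ≤ lo + k) := by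
      constructor
      · intro ⟨h1, _, h3⟩
        have hdi : d ∣ ((lo:Int) + (k:Int)) := by
          have he2 : (lo:Int) + (k:Int) = ((lo:Int) + (k:Int) - m0) + m0 := by ring
          rw [he2]
          exact dvd_add h3 hdm0
        constructor
        · rw [← hdc] at hdi
          exact_mod_cast hdi
        · have : 2 * d ≤ m0 := le_max_left _ _
          omega
      · intro ⟨h1, h2⟩
        have hdi : d ∣ ((lo:Int) + (k:Int)) := by
          rw [← hdc]
          exact_mod_cast h1
        obtain ⟨q, hq⟩ := hdi
        have hq' : 0 < q := by nlinarith
        have hceil2 : -(-(lo:Int) / d) * d ≤ (lo:Int) + (k:Int) := by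
          have hle : -q ≤ -(lo:Int) / d := by
            rw [Int.le_ediv_iff_mul_le hd]
            have hring : -q * d = -(d * q) := by ring
            omega
          nlinarith
        refine ⟨max_le (by omega) hceil2, by exact_mod_cast hk, ?_⟩
        exact dvd_sub ⟨q, hq⟩ hdm0
    by_cases hc : d.toNat ∣ (lo + k) ∧ 2 * d.toNat ≤ lo + k
    · rw [if_pos (hiff.mpr hc), if_pos hc]
      push_cast
      omega
    · rw [if_neg (fun hx => hc (hiff.mp hx)), if_neg hc]
      push_cast
      omega
  · rw [divLoopL, dif_neg h]
    have hz : (∑ e ∈ Finset.Ico d.toNat hi,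
        if e ∣ (lo + k) ∧ 2 * e ≤ lo + k then e else 0) = 0 := by
      apply Finset.sum_eq_zero
      intro e he
      rw [Finset.mem_Ico] at he
      rw [if_neg (by intro ⟨_, hx⟩; omega)]
    rw [hz]
    simp
termination_by hi - 2 * d.toNat
decreasing_by omega

theorem indicator_sum_eq_propSum (M i : ℕ) (hi2 : 2 ≤ i) (hiM : i < M) :
    (∑ e ∈ Finset.Ico 1 M, if e ∣ i ∧ 2 * e ≤ i then e else 0) = propSum i := by
  have hsplit : Finset.Ico 1 M = Finset.Ico 1 (i / 2 + 1) ∪ Finset.Ico (i / 2 + 1) M := by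
    rw [Finset.Ico_union_Ico_eq_Ico (by omega) (by omega)]
  rw [hsplit, Finset.sum_union (by apply Finset.Ico_disjoint_Ico_consecutive)]
  have h2 : (∑ e ∈ Finset.Ico (i / 2 + 1) M, if e ∣ i ∧ 2 * e ≤ i then e else 0) = 0 := by
    apply Finset.sum_eq_zero
    intro e he
    rw [Finset.mem_Ico] at he
    rw [if_neg (by intro ⟨_, hx⟩; omega)]
  have h1 : (∑ e ∈ Finset.Ico 1 (i / 2 + 1), if e ∣ i ∧ 2 * e ≤ i then e else 0)
      = propSum i := by
    unfold propSum
    apply Finset.sum_congr rfl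
    intro e he
    rw [Finset.mem_Ico] at he
    by_cases hdv : e ∣ i
    · rw [if_pos ⟨hdv, by omega⟩, if_pos hdv]
    · rw [if_neg (fun hx => hdv hx.1), if_neg hdv]
  rw [h1, h2]
  omega

theorem seg_entry (hi lo k : ℕ) (hlo : 2 ≤ lo) (hk : lo + k < hi) :
    (divLoopL (hi:Int) (lo:Int) 1 (List.replicate (hi - lo) (0:Int))).getD k 0
      = (propSum (lo + k) : Int) := by
  rw [divLoopL_getD hi lo 1 _ (by norm_num) (by omega) k hk (by simp; omega)]
  rw [List.getD_eq_getElem?_getD, List.getElem?_replicate_of_lt (by omega)]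
  have hto : ((1:Int)).toNat = 1 := rfl
  rw [hto, indicator_sum_eq_propSum hi (lo + k) (by omega) hk]
  simp

theorem segLoop_true_iff (x : Int) (n lo seg : ℕ) (hlo : 2 ≤ lo) (hseg : 1 ≤ seg) :
    segLoop x (n:Int) (lo:Int) (seg:Int) = true
      ↔ ∀ i : ℕ, lo ≤ i → i < n → (propSum i : Int) ≠ x := by
  by_cases h : (lo:Int) < (n:Int)
  · rw [segLoop, dif_pos ⟨h, by exact_mod_cast hseg⟩]
    set hiN : ℕ := min (lo + seg) n with hhiN
    have hmin : min ((lo:Int) + (seg:Int)) (n:Int) = ((hiN:ℕ):Int) := by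
      rw [hhiN]
      push_cast
      omega
    have hlohi : lo < hiN := by omega
    have hhin : hiN ≤ n := by omega
    rw [show (have hi := min ((lo:Int) + (seg:Int)) (n:Int);
        have sums := divLoop hi (lo:Int) 1 (Array.replicate (hi - (lo:Int)).toNat 0);
        if sums.toList.contains x = true then false
        else segLoop x (n:Int) hi (min (2 * (seg:Int)) 4096))
      = (if (divLoop (min ((lo:Int) + (seg:Int)) (n:Int)) (lo:Int) 1
            (Array.replicate ((min ((lo:Int) + (seg:Int)) (n:Int)) - (lo:Int)).toNat 0)).toList.contains x = true
         then false
         else segLoop x (n:Int) (min ((lo:Int) + (seg:Int)) (n:Int)) (min (2 * (seg:Int)) 4096)) from rfl]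
    rw [hmin]
    have htn : (((hiN:ℕ):Int) - ((lo:ℕ):Int)).toNat = hiN - lo := by omega
    rw [htn]
    set L : List Int :=
      (divLoop ((hiN:ℕ):Int) ((lo:ℕ):Int) 1 (Array.replicate (hiN - lo) (0:Int))).toList with hLdef
    have hLeq : L = divLoopL ((hiN:ℕ):Int) ((lo:ℕ):Int) 1 (List.replicate (hiN - lo) (0:Int)) := by
      rw [hLdef, divLoop_toList, Array.toList_replicate]
    have hLlen : L.length = hiN - lo := by
      rw [hLeq, divLoopL_length, List.length_replicate]
    have hmemiff : L.contains x = true ↔ ∃ i : ℕ, lo ≤ i ∧ i < hiN ∧ (propSum i : Int) = x := by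
      rw [List.contains_eq_mem, decide_eq_true_iff, List.mem_iff_getElem?]
      constructor
      · intro ⟨k, hk⟩
        have hklt : k < L.length := by
          by_contra hc
          rw [List.getElem?_eq_none (by omega)] at hk
          simp at hk
        have hgd : L.getD k 0 = x := by
          rw [List.getD_eq_getElem?_getD, hk]
          rfl
        rw [hLeq, seg_entry hiN lo k hlo (by omega)] at hgd
        exact ⟨lo + k, by omega, by omega, hgd⟩
      · intro ⟨i, hi1, hi2, hi3⟩
        refine ⟨i - lo, ?_⟩
        rw [List.getElem?_eq_getElem (by omega)]
        have hgd : L[i - lo]'(by omega) = L.getD (i - lo) 0 := by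
          rw [List.getD_eq_getElem?_getD, List.getElem?_eq_getElem (by omega)]
          rfl
        rw [hgd, hLeq, seg_entry hiN lo (i - lo) hlo (by omega)]
        have he : lo + (i - lo) = i := by omega
        rw [he, hi3]
    by_cases hc : L.contains x = true
    · rw [if_pos hc]
      obtain ⟨i, hi1, hi2, hi3⟩ := hmemiff.mp hc
      constructor
      · intro hfalse
        exact absurd hfalse (by simp)
      · intro hall
        exact absurd hi3 (hall i hi1 (by omega))
    · rw [if_neg hc]
      rw [show min (2 * (seg:Int)) 4096 = ((min (2 * seg) 4096 : ℕ) : Int) by push_cast; omega]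
      rw [segLoop_true_iff x n hiN (min (2 * seg) 4096) (by omega) (by omega)]
      constructor
      · intro hall i hi1 hi2
        by_cases hih : i < hiN
        · intro heq
          exact hc (hmemiff.mpr ⟨i, hi1, hih, heq⟩)
        · exact hall i (by omega) hi2
      · intro hall i hi1 hi2
        exact hall i (by omega) hi2
  · rw [segLoop, dif_neg (fun hc => h hc.1)]
    constructor
    · intro _ i hi1 hi2 _
      have : (lo:Int) < (n:Int) := by exact_mod_cast lt_of_le_of_lt hi1 hi2
      exact h this
    · intro _
      rfl
termination_by n - lo
decreasing_by omega

theorem alt_true_iff (x : Int) :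
    intocavel_alt x = true ↔ ∀ i : ℕ, 2 ≤ i → (i:Int) < x * x → (propSum i : Int) ≠ x := by
  have hM : (0:Int) ≤ x * x := mul_self_nonneg x
  set N : ℕ := (x * x).toNat with hN
  have hNx : ((N : ℕ) : Int) = x * x := by omega
  rw [show intocavel_alt x = segLoop x (x * x) 2 64 from rfl, ← hNx]
  have h := segLoop_true_iff x N 2 64 (by norm_num) (by norm_num)
  rw [show ((2:ℕ):Int) = (2:Int) by norm_num, show ((64:ℕ):Int) = (64:Int) by norm_num] at h
  rw [h]
  constructor
  · intro ha i h2 hix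
    exact ha i h2 (by omega)
  · intro ha i h2 hiN
    exact ha i h2 (by omega)

theorem a_true_iff (x : Int) :
    intocavel x = true ↔ ∀ i : ℕ, 2 ≤ i → (i:Int) < x * x → (propSum i : Int) ≠ x := by
  unfold intocavel
  rw [loopA_true_iff]
  have hsq : x ^ 2 = x * x := sq x
  constructor
  · intro hall i hi2 hix
    have hmem : ((i:ℕ):Int) ∈ PySem.List.pyRange 2 (x ^ 2) 1 := by
      rw [PySem.List.mem_pyRange_one]
      constructor
      · exact_mod_cast hi2
      · rw [hsq]; exact hix
    have := hall _ hmem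
    rw [divsA_eq_propSum i] at this
    exact this
  · intro hall i hmem
    rw [PySem.List.mem_pyRange_one] at hmem
    obtain ⟨h2, hx2⟩ := hmem
    obtain ⟨m, rfl⟩ : ∃ m : ℕ, i = (m : Int) := ⟨i.toNat, by omega⟩
    rw [divsA_eq_propSum m]
    exact hall m (by exact_mod_cast h2) (by rw [← hsq]; exact hx2)

-- ===== VERDICT (by name: the statement is the Claim_ definition above) =====
theorem intocavel_spec : Claim_equal_intocavel := by
  intro x _
  unfold Spec_intocavel
  exact Bool.eq_iff_iff.mpr ((a_true_iff x).trans (alt_true_iff x).symm)
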